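-- pv_equiv track=rewrite | github.com/almk277/lemon | tests/client.py | generate_sample_chains
-- ===== SOURCE A (Python) =====
-- def is_good(sample):
--     _, _, _, _, (code, _) = sample
--     return code == 200
--
-- def generate_sample_chains(samples):
--     for s in samples:
--         yield [s]
--     for s1 in filter(is_good, samples):
--         for s2 in samples:
--             yield [s1, s2]
--     for s1 in filter(is_good, samples):
--         for s2 in filter(is_good, samples):
--             for s3 in samples:
--                 yield [s1, s2, s3]
-- ===== SOURCE B (Python) =====
-- def is_good(sample):
--     _, _, _, _, (code, _) = sample
--     return code == 200
--
-- def generate_sample_chains(samples):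
--     # BFS over the chain tree: keep a frontier of good prefixes and grow it layer by layer.
--     prefixes = [[]]
--     for _ in range(3):
--         for p in prefixes:
--             for s in samples:
--                 yield p + [s]
--         prefixes = [p + [s] for p in prefixes for s in samples if is_good(s)]
-- ===== Notes on version B (the rewrite author's own statement) =====
-- stated objective: alternative
-- what changed: Replaces A's three hardcoded nested-loop stanzas (re-filtering samples in every inner loop) with a breadth-first traversal of the chain tree: a frontier of good prefixes is maintained and grown layer by layer, each layer emitting prefix+[s] for every sample.
import Mathlib
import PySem

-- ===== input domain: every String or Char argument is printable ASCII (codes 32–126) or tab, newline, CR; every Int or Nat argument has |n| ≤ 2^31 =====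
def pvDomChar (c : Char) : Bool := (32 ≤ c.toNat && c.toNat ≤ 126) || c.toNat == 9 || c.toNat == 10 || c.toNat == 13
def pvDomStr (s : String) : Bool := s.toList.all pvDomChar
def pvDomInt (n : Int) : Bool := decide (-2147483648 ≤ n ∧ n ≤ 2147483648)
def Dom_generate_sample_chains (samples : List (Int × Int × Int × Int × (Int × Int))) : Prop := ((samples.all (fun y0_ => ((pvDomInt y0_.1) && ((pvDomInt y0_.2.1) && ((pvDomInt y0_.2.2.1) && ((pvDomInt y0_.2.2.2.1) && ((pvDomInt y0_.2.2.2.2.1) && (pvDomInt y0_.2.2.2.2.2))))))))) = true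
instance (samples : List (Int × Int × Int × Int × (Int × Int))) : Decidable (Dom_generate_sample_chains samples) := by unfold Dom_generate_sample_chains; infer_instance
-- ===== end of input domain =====

-- B replaces A's three hardcoded nested-loop stanzas by a breadth-first traversal of the
-- chain tree maintaining a frontier of good prefixes (objective: alternative decomposition).


-- ===== PORT A =====
-- is_good(sample): code == 200
def is_good (sample : Int × Int × Int × Int × (Int × Int)) : Bool :=
  sample.2.2.2.2.1 == 200

-- A's yields, in order: singles, then good×all, then good×good×all.
def generate_sample_chains (samples : List (Int × Int × Int × Int × (Int × Int))) : List (List (Int × Int × Int × Int × (Int × Int))) :=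
  (samples.map (fun s => [s]))
  ++ ((samples.filter is_good).flatMap (fun s1 =>
        samples.map (fun s2 => [s1, s2])))
  ++ ((samples.filter is_good).flatMap (fun s1 =>
        (samples.filter is_good).flatMap (fun s2 =>
          samples.map (fun s3 => [s1, s2, s3]))))

-- ===== PORT B =====
-- One BFS layer loop: emit prefix+[s] for every prefix in the frontier and every sample,
-- then grow the frontier with the good samples; 'fuel' counts the remaining layers (3,2,1).
def bfsLayers (samples : List (Int × Int × Int × Int × (Int × Int)))
    (fuel : Nat) (prefixes : List (List (Int × Int × Int × Int × (Int × Int)))) :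
    List (List (Int × Int × Int × Int × (Int × Int))) :=
  match fuel with
  | 0 => []
  | Nat.succ n =>
      (prefixes.flatMap (fun p => samples.map (fun s => p ++ [s])))
      ++ bfsLayers samples n
           (prefixes.flatMap (fun p => (samples.filter is_good).map (fun s => p ++ [s])))

def generate_sample_chains_alt (samples : List (Int × Int × Int × Int × (Int × Int))) : List (List (Int × Int × Int × Int × (Int × Int))) :=
  bfsLayers samples 3 [[]]

-- ===== PRECONDITION & SPEC =====
def Spec_generate_sample_chains (samples : List (Int × Int × Int × Int × (Int × Int))) (out : List (List (Int × Int × Int × Int × (Int × Int)))) : Prop := out = generate_sample_chains_alt samples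
instance (samples : List (Int × Int × Int × Int × (Int × Int))) (out : List (List (Int × Int × Int × Int × (Int × Int)))) : Decidable (Spec_generate_sample_chains samples out) := by
  unfold Spec_generate_sample_chains; exact @List.hasDecEq _ (fun a b => a.hasDecEq b) out _

-- ===== CLAIM (what is proved, stated in full; the proofs are below) =====
def Claim_equal_generate_sample_chains : Prop := ∀ (samples : List (Int × Int × Int × Int × (Int × Int))), Dom_generate_sample_chains samples → Spec_generate_sample_chains samples (generate_sample_chains samples)

-- ===== LEMMAS AND PROOFS =====

-- ===== VERDICT (by name: the statement is the Claim_ definition above) =====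
theorem generate_sample_chains_spec : Claim_equal_generate_sample_chains := by
  intro samples _
  unfold Spec_generate_sample_chains generate_sample_chains generate_sample_chains_alt
  simp [bfsLayers, List.map_eq_flatMap, List.flatMap_assoc]
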